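-- pv_equiv track=rewrite | github.com/Jonathanseng/Advanced-Number-Theory | 25. Sums of squares.py | sums_of_squares
-- ===== SOURCE A (Python) =====
-- def sums_of_squares(n):
--   """Returns a list of all sums of squares up to n."""
--   if n == 0:
--     return [0]
--   else:
--     result = []
--     for i in range(n + 1):
--       for j in range(i + 1):
--         if i * i + j * j <= n:
--           result.append(i * i + j * j)
--     return result
-- ===== SOURCE B (Python) =====
-- def sums_of_squares(n):
--   """Returns a list of all sums of squares up to n."""
--   result = []
--   i = 0
--   while i * i <= n:
--     j = 0
--     while j <= i and i * i + j * j <= n: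
--       result.append(i * i + j * j)
--       j += 1
--     i += 1
--   return result
-- ===== Notes on version B (the rewrite author's own statement) =====
-- stated objective: faster
-- what changed: Replaces the quadratic double scan over every pair j<=i up to n with while loops that stop as soon as the square of i, resp. the pair's sum of squares, exceeds n, exploiting monotonicity so only contributing pairs are visited.
import Mathlib
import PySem

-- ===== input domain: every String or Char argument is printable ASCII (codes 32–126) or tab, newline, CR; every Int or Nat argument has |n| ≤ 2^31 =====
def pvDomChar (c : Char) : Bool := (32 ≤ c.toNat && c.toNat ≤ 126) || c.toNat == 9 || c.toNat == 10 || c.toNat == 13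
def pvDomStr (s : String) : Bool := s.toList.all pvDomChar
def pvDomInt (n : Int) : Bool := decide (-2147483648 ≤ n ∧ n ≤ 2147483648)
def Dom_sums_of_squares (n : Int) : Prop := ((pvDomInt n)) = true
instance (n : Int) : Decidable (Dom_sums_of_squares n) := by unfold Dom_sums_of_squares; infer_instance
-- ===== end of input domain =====

-- B replaces A's scan over every pair j ≤ i up to n with while loops that stop as soon as
-- the square of i (outer) resp. the pair's sum of squares (inner) exceeds n.

-- ===== PORT A =====
def sums_of_squares (n : Int) : List Int :=
  if n = 0 then [0]
  else
    (PySem.List.pyRange 0 (n + 1) 1).foldl (fun result i =>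
      (PySem.List.pyRange 0 (i + 1) 1).foldl (fun result j =>
        if i * i + j * j ≤ n then result ++ [i * i + j * j] else result) result) []

-- ===== PORT B =====
-- i*i ≤ n → i ≤ n (used for termination of the outer while loop)
theorem sos_le_of_sq_le {i n : Int} (h : i * i ≤ n) : i ≤ n := by
  by_cases h0 : i ≤ 0
  · exact h0.trans (le_trans (mul_self_nonneg i) h)
  · have h0' : 0 < i := by omega
    nlinarith

-- inner while loop of Source B
def sosInner (n i : Int) (j : Int) (result : List Int) : List Int :=
  if _h : j ≤ i ∧ i * i + j * j ≤ n then
    sosInner n i (j + 1) (result ++ [i * i + j * j])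
  else result
termination_by (i + 1 - j).toNat
decreasing_by omega

-- outer while loop of Source B
def sosOuter (n : Int) (i : Int) (result : List Int) : List Int :=
  if h : i * i ≤ n then
    sosOuter n (i + 1) (sosInner n i 0 result)
  else result
termination_by (n + 1 - i).toNat
decreasing_by have := sos_le_of_sq_le h; omega

def sums_of_squares_alt (n : Int) : List Int := sosOuter n 0 []

-- ===== PRECONDITION & SPEC =====
def Spec_sums_of_squares (n : Int) (out : List Int) : Prop := out = sums_of_squares_alt n
instance (n : Int) (out : List Int) : Decidable (Spec_sums_of_squares n out) := by unfold Spec_sums_of_squares; infer_instance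

-- ===== CLAIM (what is proved, stated in full; the proofs are below) =====
def Claim_equal_sums_of_squares : Prop := ∀ (n : Int), Dom_sums_of_squares n → Spec_sums_of_squares n (sums_of_squares n)

-- ===== LEMMAS AND PROOFS =====

-- a fold whose step never changes the accumulator is the identity
theorem foldl_id_of_fix {α β : Type} (f : β → α → β) (l : List α)
    (h : ∀ b, ∀ x ∈ l, f b x = b) : ∀ b, l.foldl f b = b := by
  induction l with
  | nil => intro b; rfl
  | cons x xs ih =>
      intro b
      rw [List.foldl_cons, h b x List.mem_cons_self]
      exact ih (fun b y hy => h b y (List.mem_cons_of_mem _ hy)) b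

-- A's inner loop over range(i+1), resumed at j, equals B's inner while loop
theorem inner_eq (n i : Int) : ∀ (k : Nat) (j : Int), (i + 1 - j).toNat = k → 0 ≤ j →
    ∀ acc,
    (PySem.List.pyRange j (i + 1) 1).foldl (fun result jj =>
      if i * i + jj * jj ≤ n then result ++ [i * i + jj * jj] else result) acc
    = sosInner n i j acc := by
  intro k
  induction k with
  | zero =>
      intro j hk hj acc
      have hji : i + 1 ≤ j := by omega
      rw [PySem.List.pyRange_one_eq_nil hji, sosInner, dif_neg (by omega)]
      rfl
  | succ k ih =>
      intro j hk hj acc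
      have hji : j ≤ i := by omega
      rw [sosInner]
      by_cases hc : i * i + j * j ≤ n
      · rw [dif_pos ⟨hji, hc⟩, PySem.List.pyRange_one_cons (by omega), List.foldl_cons,
          if_pos hc]
        exact ih (j + 1) (by omega) (by omega) _
      · rw [dif_neg (by tauto)]
        refine foldl_id_of_fix _ _ ?_ acc
        intro b jj hjj
        have hmem := (PySem.List.mem_pyRange_one.mp hjj).1
        have hsq : j * j ≤ jj * jj := mul_le_mul hmem hmem hj (le_trans hj hmem)
        rw [if_neg (by omega)]

-- A's outer loop over range(n+1), resumed at i, equals B's outer while loop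
theorem outer_eq (n : Int) : ∀ (k : Nat) (i : Int), (n + 1 - i).toNat = k → 0 ≤ i →
    ∀ acc,
    (PySem.List.pyRange i (n + 1) 1).foldl (fun result ii =>
      (PySem.List.pyRange 0 (ii + 1) 1).foldl (fun result j =>
        if ii * ii + j * j ≤ n then result ++ [ii * ii + j * j] else result) result) acc
    = sosOuter n i acc := by
  intro k
  induction k with
  | zero =>
      intro i hk hi acc
      have hin : n + 1 ≤ i := by omega
      have : ¬ i * i ≤ n := fun h => by have := sos_le_of_sq_le h; omega
      rw [PySem.List.pyRange_one_eq_nil hin, sosOuter, dif_neg this]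
      rfl
  | succ k ih =>
      intro i hk hi acc
      rw [sosOuter]
      by_cases hc : i * i ≤ n
      · have hilt : i < n + 1 := by have := sos_le_of_sq_le hc; omega
        rw [dif_pos hc, PySem.List.pyRange_one_cons hilt, List.foldl_cons,
          inner_eq n i (i + 1 - 0).toNat 0 rfl le_rfl acc]
        exact ih (i + 1) (by omega) (by omega) _
      · rw [dif_neg hc]
        refine foldl_id_of_fix _ _ ?_ acc
        intro b ii hii
        have hmem := (PySem.List.mem_pyRange_one.mp hii).1
        have hsq : i * i ≤ ii * ii := mul_le_mul hmem hmem hi (le_trans hi hmem)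
        refine foldl_id_of_fix _ _ ?_ b
        intro b' jj _
        have := mul_self_nonneg jj
        rw [if_neg (by omega)]

-- ===== VERDICT (by name: the statement is the Claim_ definition above) =====
theorem sums_of_squares_spec : Claim_equal_sums_of_squares := by
  intro n _
  unfold Spec_sums_of_squares sums_of_squares sums_of_squares_alt
  by_cases h0 : n = 0
  · subst h0
    rw [if_pos rfl, sosOuter, dif_pos (by norm_num), sosInner, dif_pos (by norm_num),
      sosInner, dif_neg (by norm_num), sosOuter, dif_neg (by norm_num)]
    rfl
  · rw [if_neg h0]
    exact outer_eq n (n + 1 - 0).toNat 0 rfl le_rfl []
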